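-- pv_equiv track=rewrite | github.com/tal66/aoc | aoc11/aoc.py | cols_to_expand_indices
-- ===== SOURCE A (Python) =====
-- def cols_to_expand_indices(lines):
--     cols_to_expand = []
--     for j in range(len(lines[0])):
--         all_dots = True
--         for i in range(len(lines)):
--             if lines[i][j] != '.':
--                 all_dots = False
--                 continue
--
--         if all_dots:
--             cols_to_expand.append(j)
--     return cols_to_expand
-- ===== SOURCE B (Python) =====
-- def cols_to_expand_indices(lines):
--     ncols = len(lines[0])
--     bad = set()
--     for row in lines:
--         bad.update(j for j in range(ncols) if row[j] != '.')
--     return [j for j in range(ncols) if j not in bad]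
-- ===== Notes on version B (the rewrite author's own statement) =====
-- stated objective: idiomatic
-- what changed: Replaces A's column-major nested scan (rescanning every row per column with a no-op continue) by a single row-major pass that accumulates a set of disqualified columns, then filters range(ncols); on inputs A raises IndexError (empty list, or a row shorter than lines[0]), excluded by Pre_.
import Mathlib
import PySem

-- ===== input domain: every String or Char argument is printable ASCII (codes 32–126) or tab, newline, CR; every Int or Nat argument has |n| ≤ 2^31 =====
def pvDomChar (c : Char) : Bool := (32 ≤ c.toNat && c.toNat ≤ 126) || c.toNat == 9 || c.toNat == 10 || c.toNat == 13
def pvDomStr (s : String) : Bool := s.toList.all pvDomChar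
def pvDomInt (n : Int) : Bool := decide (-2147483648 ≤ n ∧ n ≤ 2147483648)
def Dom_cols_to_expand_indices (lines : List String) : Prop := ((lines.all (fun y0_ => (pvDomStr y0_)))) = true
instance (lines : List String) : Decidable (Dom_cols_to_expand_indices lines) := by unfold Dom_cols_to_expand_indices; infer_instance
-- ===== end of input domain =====

-- B replaces A's column-by-column rescans with a single row-major pass that collects the set of
-- non-dot ("bad") columns, then filters range(ncols); equivalence of the return value is proved on Pre_.

-- ===== PORT A =====
-- lines[i][j], total form under Pre_ (every access is in range there)
def pvCharAt (s : String) (j : Int) : Char := (PySem.Str.pyGet? s j).getD '!'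

def cols_to_expand_indices (lines : List String) : List Int :=
  (PySem.List.pyRange 0 (PySem.Str.len (PySem.List.pyGetD lines 0 "")) 1).foldl
    (fun acc j =>
      let all_dots :=
        (PySem.List.pyRange 0 (lines.length : Int) 1).foldl
          (fun ad i => if pvCharAt (PySem.List.pyGetD lines i "") j ≠ '.' then false else ad) true
      if all_dots then acc ++ [j] else acc) []

-- ===== PORT B =====
def cols_to_expand_indices_alt (lines : List String) : List Int :=
  let ncols : Int := PySem.Str.len (PySem.List.pyGetD lines 0 "")
  let bad : PySem.Set Int :=
    lines.foldl
      (fun bad row =>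
        PySem.Set.update bad ((PySem.List.pyRange 0 ncols 1).filter (fun j => pvCharAt row j ≠ '.')))
      PySem.Set.empty
  (PySem.List.pyRange 0 ncols 1).filter (fun j => ¬ PySem.Set.contains bad j)

-- ===== PRECONDITION & SPEC =====
-- Pre_ excludes exactly the inputs where Python A raises IndexError: empty lines (lines[0])
-- and ragged inputs where some row is shorter than lines[0].
def Pre_cols_to_expand_indices (lines : List String) : Prop :=
  lines ≠ [] ∧ ∀ s ∈ lines, (lines.headD "").toList.length ≤ s.toList.length
instance (lines : List String) : Decidable (Pre_cols_to_expand_indices lines) := by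
  unfold Pre_cols_to_expand_indices; infer_instance

def pvWitness_cols_to_expand_indices : List String := ["#.#", "..#"]

def Spec_cols_to_expand_indices (lines : List String) (out : List Int) : Prop := out = cols_to_expand_indices_alt lines
instance (lines : List String) (out : List Int) : Decidable (Spec_cols_to_expand_indices lines out) := by unfold Spec_cols_to_expand_indices; infer_instance

-- ===== CLAIM (what is proved, stated in full; the proofs are below) =====
def Claim_equal_cols_to_expand_indices : Prop := ∀ (lines : List String), Dom_cols_to_expand_indices lines → Pre_cols_to_expand_indices lines → Spec_cols_to_expand_indices lines (cols_to_expand_indices lines)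

-- ===== LEMMAS AND PROOFS =====

-- membership after the row loop of B: j is "bad" iff some row has a non-dot at j
theorem mem_foldl_update {l : List String} {s : PySem.Set Int} (f : String → List Int) (y : Int) :
    y ∈ l.foldl (fun s row => PySem.Set.update s (f row)) s ↔ y ∈ s ∨ ∃ row ∈ l, y ∈ f row := by
  induction l generalizing s with
  | nil => simp
  | cons r rs ih =>
    simp [List.foldl_cons, ih, PySem.Set.mem_update]
    tauto

-- A's inner loop with a Bool accumulator is an 'all' over the rows
theorem foldl_if_false_eq_all (l : List String) (p : String → Prop) [DecidablePred p] (b : Bool) :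
    l.foldl (fun ad row => if p row then false else ad) b
      = (b && l.all (fun row => decide ¬ p row)) := by
  induction l generalizing b with
  | nil => simp
  | cons r rs ih =>
    rw [List.foldl_cons, ih]
    by_cases h : p r <;> simp [h]

theorem cols_spec (lines : List String)
    (hpre : Pre_cols_to_expand_indices lines) :
    cols_to_expand_indices lines = cols_to_expand_indices_alt lines := by
  unfold cols_to_expand_indices cols_to_expand_indices_alt
  rw [PySem.List.foldl_append_if_eq_filter]
  simp only [List.nil_append]
  apply List.filter_congr
  intro j hj
  rw [PySem.List.foldl_pyRange_zero_pyGetD' lines ""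
    (fun ad row => if pvCharAt row j ≠ '.' then false else ad) true]
  rw [foldl_if_false_eq_all lines (fun row => pvCharAt row j ≠ '.') true]
  simp only [Bool.true_and]
  rw [Bool.eq_iff_iff]
  have hbad : ∀ y : Int,
      (y ∈ lines.foldl (fun bad row => PySem.Set.update bad
          ((PySem.List.pyRange 0 (PySem.Str.len (PySem.List.pyGetD lines 0 "")) 1).filter
            (fun j' => pvCharAt row j' ≠ '.'))) PySem.Set.empty)
        ↔ ∃ row ∈ lines, y ∈ (PySem.List.pyRange 0 (PySem.Str.len (PySem.List.pyGetD lines 0 "")) 1).filter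
            (fun j' => pvCharAt row j' ≠ '.') := by
    intro y
    rw [mem_foldl_update]
    simp [PySem.Set.empty]
  constructor
  · intro hall
    simp only [decide_eq_true_eq, PySem.Set.contains_eq_listContains, List.contains_eq_mem]
    intro hmem
    obtain ⟨row, hrow, hf⟩ := (hbad j).mp (by simpa using hmem)
    rw [List.mem_filter] at hf
    have hdot := List.all_eq_true.mp hall row hrow
    simp only [decide_eq_true_eq, ne_eq, not_not] at hdot
    simp only [ne_eq, decide_not, Bool.not_eq_true', decide_eq_false_iff_not] at hf
    exact absurd hdot hf.2
  · intro hcon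
    simp only [decide_eq_true_eq, PySem.Set.contains_eq_listContains, List.contains_eq_mem] at hcon
    rw [List.all_eq_true]
    intro row hrow
    by_contra hne
    simp only [ne_eq, decide_eq_true_eq, not_not] at hne
    exact hcon ((hbad j).mpr ⟨row, hrow, List.mem_filter.mpr ⟨hj, by simpa using hne⟩⟩)

-- ===== VERDICT (by name: the statement is the Claim_ definition above) =====
theorem cols_to_expand_indices_spec : Claim_equal_cols_to_expand_indices := by
  intro lines _ hpre
  exact cols_spec lines hpre
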